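-- pv_equiv track=rewrite | github.com/dkconnect10/LeetCode | 3866-first-unique-even-element/3866-first-unique-even-element.py | firstUniqueEven
-- ===== SOURCE A (Python) =====
-- def firstUniqueEven(nums: list[int]) -> int:
--     freq = {}
--     for num in nums:
--         freq[num]=freq.get(num,0)+1
--     for key,value in freq.items():
--         if value==1 and key%2==0:
--             return key
--     return -1
-- ===== SOURCE B (Python) =====
-- def firstUniqueEven(nums: list[int]) -> int:
--     for num in nums:
--         if num % 2 == 0 and nums.count(num) == 1:
--             return num
--     return -1
-- ===== Notes on version B (the rewrite author's own statement) =====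
-- stated objective: simpler
-- what changed: B drops the frequency dictionary entirely and does a direct scan of nums, re-counting each candidate with nums.count, returning the first even element that occurs exactly once.
import Mathlib
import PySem

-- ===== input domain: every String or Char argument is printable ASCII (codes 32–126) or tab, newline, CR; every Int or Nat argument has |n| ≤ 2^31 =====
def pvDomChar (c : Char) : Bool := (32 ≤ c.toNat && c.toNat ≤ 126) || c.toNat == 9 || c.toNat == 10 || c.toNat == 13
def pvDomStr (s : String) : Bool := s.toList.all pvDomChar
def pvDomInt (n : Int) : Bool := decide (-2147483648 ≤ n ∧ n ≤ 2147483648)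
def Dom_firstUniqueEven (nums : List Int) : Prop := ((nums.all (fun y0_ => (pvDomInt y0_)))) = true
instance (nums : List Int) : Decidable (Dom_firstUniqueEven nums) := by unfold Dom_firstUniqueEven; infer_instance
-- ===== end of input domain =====

-- B replaces A's frequency dictionary with a direct scan that re-counts each candidate
-- (simpler, no auxiliary structure); proved to return the same value on every input.

-- ===== PORT A =====
-- A's second loop over freq.items(): return the first key with value == 1 and key % 2 == 0, else -1.
def firstUniqueEvenScan : List (Int × Int) → Int
  | [] => -1
  | (key, value) :: rest =>
    if value == 1 && PySem.Int.mod key 2 == 0 then key else firstUniqueEvenScan rest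

def firstUniqueEven (nums : List Int) : Int :=
  let freq := nums.foldl (fun d num => d.insert num (d.getD num 0 + 1)) PySem.Dict.empty
  firstUniqueEvenScan freq.items

-- ===== PORT B =====
-- B's loop over nums itself; nums.count(num) is PySem.List.count.
def firstUniqueEvenAltGo (nums : List Int) : List Int → Int
  | [] => -1
  | num :: rest =>
    if PySem.Int.mod num 2 == 0 && (PySem.List.count nums num : Int) == 1 then num
    else firstUniqueEvenAltGo nums rest

def firstUniqueEven_alt (nums : List Int) : Int := firstUniqueEvenAltGo nums nums

-- ===== PRECONDITION & SPEC =====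
def Spec_firstUniqueEven (nums : List Int) (out : Int) : Prop := out = firstUniqueEven_alt nums
instance (nums : List Int) (out : Int) : Decidable (Spec_firstUniqueEven nums out) := by unfold Spec_firstUniqueEven; infer_instance

-- ===== CLAIM (what is proved, stated in full; the proofs are below) =====
def Claim_equal_firstUniqueEven : Prop := ∀ (nums : List Int), Dom_firstUniqueEven nums → Spec_firstUniqueEven nums (firstUniqueEven nums)

-- ===== LEMMAS AND PROOFS =====

-- value of the first element satisfying p, or -1
def pvFindVal (p : Int → Bool) (l : List Int) : Int :=
  match l.find? p with
  | some x => x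
  | none => -1

theorem scanA_map (f : Int → Int) :
    ∀ (l : List Int),
      firstUniqueEvenScan (l.map (fun k => (k, f k)))
        = pvFindVal (fun k => f k == 1 && PySem.Int.mod k 2 == 0) l := by
  intro l
  induction l with
  | nil => rfl
  | cons a t ih =>
    rw [List.map_cons]
    show (if (f a == 1 && PySem.Int.mod a 2 == 0) = true then a
          else firstUniqueEvenScan (t.map (fun k => (k, f k)))) = _
    by_cases h : (f a == 1 && PySem.Int.mod a 2 == 0) = true
    · rw [if_pos h]
      unfold pvFindVal
      rw [List.find?_cons_of_pos (l := t) h]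
    · rw [if_neg h]
      unfold pvFindVal at ih ⊢
      rw [List.find?_cons_of_neg (l := t) h]
      exact ih

theorem altGo_findVal (nums : List Int) :
    ∀ (l : List Int),
      firstUniqueEvenAltGo nums l
        = pvFindVal (fun n => PySem.Int.mod n 2 == 0 && (PySem.List.count nums n : Int) == 1) l := by
  intro l
  induction l with
  | nil => rfl
  | cons a t ih =>
    show (if (PySem.Int.mod a 2 == 0 && (PySem.List.count nums a : Int) == 1) = true then a
          else firstUniqueEvenAltGo nums t) = _
    by_cases h : (PySem.Int.mod a 2 == 0 && (PySem.List.count nums a : Int) == 1) = true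
    · rw [if_pos h]
      unfold pvFindVal
      rw [List.find?_cons_of_pos (l := t) h]
    · rw [if_neg h]
      unfold pvFindVal at ih ⊢
      rw [List.find?_cons_of_neg (l := t) h]
      exact ih

-- first-occurrence dedup does not change the first hit of a predicate that only
-- holds on elements occurring at most once
theorem find?_ofList (p : Int → Bool) :
    ∀ (l : List Int), (∀ x ∈ l, p x = true → l.count x ≤ 1) →
      List.find? p (PySem.Set.ofList l) = List.find? p l := by
  intro l
  induction l using List.reverseRecOn with
  | nil => intro _; rfl
  | append_singleton t a ih =>
    intro h
    have hof : PySem.Set.ofList (t ++ [a]) = PySem.Set.add (PySem.Set.ofList t) a := by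
      rw [PySem.Set.ofList_eq_foldl, PySem.Set.ofList_eq_foldl, List.foldl_append]
      rfl
    have ht : ∀ x ∈ t, p x = true → t.count x ≤ 1 := by
      intro x hx hp
      have h1 := h x (List.mem_append_left _ hx) hp
      have hc : (t ++ [a]).count x = t.count x + [a].count x := List.count_append ..
      omega
    by_cases hmem : a ∈ PySem.Set.ofList t
    · have hat : a ∈ t := (PySem.Set.mem_ofList t a).mp hmem
      have hadd : PySem.Set.add (PySem.Set.ofList t) a = PySem.Set.ofList t := by
        simp [PySem.Set.add, PySem.Set.contains, hmem]
      have hpa : ¬ p a = true := by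
        intro hpa
        have h1 := h a (List.mem_append_right _ (List.mem_singleton.mpr rfl)) hpa
        have hc : List.count a (t ++ [a]) = List.count a t + 1 := by simp
        have h2 : 1 ≤ t.count a := List.one_le_count_iff.mpr hat
        omega
      rw [hof, hadd, ih ht, List.find?_append]
      simp [List.find?, hpa]
    · have hadd : PySem.Set.add (PySem.Set.ofList t) a = PySem.Set.ofList t ++ [a] := by
        simp [PySem.Set.add, PySem.Set.contains, hmem]
      rw [hof, hadd, List.find?_append, List.find?_append, ih ht]

-- ===== VERDICT (by name: the statement is the Claim_ definition above) =====
theorem firstUniqueEven_spec : Claim_equal_firstUniqueEven := by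
  intro nums _
  unfold Spec_firstUniqueEven firstUniqueEven firstUniqueEven_alt
  show firstUniqueEvenScan
      (List.foldl (fun d num => d.insert num (d.getD num 0 + 1)) PySem.Dict.empty nums).items
      = firstUniqueEvenAltGo nums nums
  rw [PySem.Dict.foldl_insert_getD_add_one_eq_counter, PySem.Dict.items_counter,
    scanA_map, altGo_findVal]
  have hpred : (fun k => ((List.count k nums : Int) == 1 && PySem.Int.mod k 2 == 0))
      = (fun n => (PySem.Int.mod n 2 == 0 && (PySem.List.count nums n : Int) == 1)) := by
    funext k
    rw [Bool.and_comm]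
    rfl
  rw [hpred]
  unfold pvFindVal
  rw [find?_ofList]
  intro x _ hp
  rw [Bool.and_eq_true] at hp
  have h1 : (PySem.List.count nums x : Int) = 1 := beq_iff_eq.mp hp.2
  have h2 : List.count x nums = 1 := by exact_mod_cast h1
  omega
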